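-- pv_equiv track=rewrite | github.com/alba008/shops | recommender/management/commands/build_recs.py | build_copurchase_counts
-- ===== SOURCE A (Python) =====
-- from collections import defaultdict
-- from typing import Dict, Iterable, List, Tuple
--
-- def build_copurchase_counts(order_items: Iterable[Tuple[int, int]]) -> Dict[Tuple[int, int], int]:
--     """
--     Build co-purchase counts from (order_id, product_id) pairs.
--     Returns dict mapping (pid_a, pid_b) -> count.
--     """
--     by_order: Dict[int, List[int]] = defaultdict(list)
--     for oid, pid in order_items:
--         by_order[oid].append(pid)
--
--     co: Dict[Tuple[int, int], int] = defaultdict(int)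
--     for plist in by_order.values():
--         n = len(plist)
--         if n < 2:
--             continue
--         for i in range(n):
--             a = plist[i]
--             for j in range(i + 1, n):
--                 b = plist[j]
--                 if a == b:
--                     continue
--                 co[(a, b)] += 1
--                 co[(b, a)] += 1
--     return co
-- ===== SOURCE B (Python) =====
-- def build_copurchase_counts(order_items):
--     """
--     Build co-purchase counts from (order_id, product_id) pairs.
--     Returns dict mapping (pid_a, pid_b) -> count.
--     """
--     by_order = {}
--     for oid, pid in order_items:
--         by_order.setdefault(oid, []).append(pid)
--
--     co = {}
--     for plist in by_order.values():
--         # multiplicity map: product_id -> how many times it occurs in this order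
--         cnt = {}
--         for p in plist:
--             cnt[p] = cnt.get(p, 0) + 1
--         pids = list(cnt)
--         # one visit per unordered pair of DISTINCT product ids; multiplicities multiply
--         for i, a in enumerate(pids):
--             for b in pids[i + 1:]:
--                 k = cnt[a] * cnt[b]
--                 co[(a, b)] = co.get((a, b), 0) + k
--                 co[(b, a)] = co.get((b, a), 0) + k
--     return co
-- ===== Notes on version B (the rewrite author's own statement) =====
-- stated objective: alternative
-- what changed: Per order, B builds a product-id -> multiplicity map and visits each unordered pair of DISTINCT product ids once, adding cnt[a]*cnt[b] to both directed keys, instead of A's quadratic scan over all item positions adding 1 per position pair; with repeated product ids per order B does strictly less pair work.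
import Mathlib
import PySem

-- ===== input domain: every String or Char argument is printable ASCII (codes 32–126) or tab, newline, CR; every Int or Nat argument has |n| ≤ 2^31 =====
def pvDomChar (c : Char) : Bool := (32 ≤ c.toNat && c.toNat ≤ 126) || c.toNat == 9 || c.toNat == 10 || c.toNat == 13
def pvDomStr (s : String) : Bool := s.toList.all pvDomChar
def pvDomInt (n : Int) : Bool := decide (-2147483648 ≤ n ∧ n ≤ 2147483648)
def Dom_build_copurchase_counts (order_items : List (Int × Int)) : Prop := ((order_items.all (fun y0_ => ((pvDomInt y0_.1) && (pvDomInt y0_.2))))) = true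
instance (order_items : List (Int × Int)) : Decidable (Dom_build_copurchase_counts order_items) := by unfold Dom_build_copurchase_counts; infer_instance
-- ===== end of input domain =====

-- B groups items per order as A does, but then counts multiplicities per product id and visits
-- each unordered pair of DISTINCT product ids once, adding cnt[a]*cnt[b] to both directed keys,
-- instead of A's scan over all position pairs adding 1 at a time (objective: alternative algorithm).

-- ===== PORT A =====
def build_copurchase_counts (order_items : List (Int × Int)) : List (Int × Int × Int) :=
  -- by_order[oid].append(pid)  (defaultdict(list))
  let by_order : PySem.Dict Int (List Int) :=
    order_items.foldl (fun d op => d.modify op.1 [] (fun l => l ++ [op.2])) PySem.Dict.empty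
  let co : PySem.Dict (Int × Int) Int :=
    by_order.values.foldl (fun co plist =>
      let n : Int := (plist.length : Int)
      if n < 2 then co
      else
        (PySem.List.pyRange 0 n 1).foldl (fun co i =>
          let a : Int := PySem.List.pyGetD plist i 0   -- plist[i]; i ∈ range(n) is always in range
          (PySem.List.pyRange (i + 1) n 1).foldl (fun co j =>
            let b : Int := PySem.List.pyGetD plist j 0 -- plist[j]; j ∈ range(i+1,n) is always in range
            if a = b then co
            else
              let co1 := co.modify (a, b) 0 (fun v => v + 1)  -- co[(a,b)] += 1 (defaultdict(int))
              co1.modify (b, a) 0 (fun v => v + 1)) co) co)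
      PySem.Dict.empty
  co.items.map (fun p => (p.1.1, p.1.2, p.2))

-- ===== PORT B =====
def build_copurchase_counts_alt (order_items : List (Int × Int)) : List (Int × Int × Int) :=
  -- by_order.setdefault(oid, []).append(pid)
  let by_order : PySem.Dict Int (List Int) :=
    order_items.foldl (fun d op => d.insert op.1 (d.getD op.1 [] ++ [op.2])) PySem.Dict.empty
  let co : PySem.Dict (Int × Int) Int :=
    by_order.values.foldl (fun co plist =>
      let cnt : PySem.Dict Int Int :=
        plist.foldl (fun d p => d.insert p (d.getD p 0 + 1)) PySem.Dict.empty
      let pids : List Int := cnt.keys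
      (PySem.List.enumerate pids).foldl (fun co ia =>
        (PySem.List.slice pids (some (ia.1 + 1)) none).foldl (fun co b =>
          -- cnt[a], cnt[b]: both keys are always present in cnt
          let k : Int := cnt.getD ia.2 0 * cnt.getD b 0
          let co1 := co.insert (ia.2, b) (co.getD (ia.2, b) 0 + k)
          co1.insert (b, ia.2) (co1.getD (b, ia.2) 0 + k)) co) co)
      PySem.Dict.empty
  co.items.map (fun p => (p.1.1, p.1.2, p.2))

-- ===== PRECONDITION & SPEC =====
def Spec_build_copurchase_counts (order_items : List (Int × Int)) (out : List (Int × Int × Int)) : Prop := out = build_copurchase_counts_alt order_items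
instance (order_items : List (Int × Int)) (out : List (Int × Int × Int)) : Decidable (Spec_build_copurchase_counts order_items out) := by unfold Spec_build_copurchase_counts; infer_instance

-- ===== CLAIM (what is proved, stated in full; the proofs are below) =====
def Claim_equal_build_copurchase_counts : Prop := ∀ (order_items : List (Int × Int)), Dom_build_copurchase_counts order_items → Spec_build_copurchase_counts order_items (build_copurchase_counts order_items)

-- ===== LEMMAS AND PROOFS =====

def pvStep (co : PySem.Dict (Int × Int) Int) (e : (Int × Int) × Int) : PySem.Dict (Int × Int) Int :=
  co.insert e.1 (co.getD e.1 0 + e.2)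
def pvMerge (c d : PySem.Dict (Int × Int) Int) : PySem.Dict (Int × Int) Int :=
  PySem.Dict.mk (c.items.map (fun p => (p.1, p.2 + d.getD p.1 0)) ++
    d.items.filter (fun p => !(c.contains p.1)))

lemma pv_merge_empty (c : PySem.Dict (Int × Int) Int) : pvMerge c PySem.Dict.empty = c := by
  apply PySem.Dict.ext
  simp [pvMerge, PySem.Dict.empty, PySem.Dict.getD, PySem.Dict.get?]

lemma pv_getD_filter_ne (l : List ((Int × Int) × Int)) (k q : Int × Int) (d : Int) (h : q ≠ k) :
    PySem.Dict.getD (PySem.Dict.mk (l.filter (fun p => !(p.1 == k)))) q d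
      = PySem.Dict.getD (PySem.Dict.mk l) q d := by
  simp only [PySem.Dict.getD, PySem.Dict.get?, List.find?_filter]
  have hpred : (fun a : (Int × Int) × Int => decide ((!(a.1 == k)) = true ∧ (a.1 == q) = true))
      = (fun p : (Int × Int) × Int => p.1 == q) := by
    funext a
    by_cases h1 : a.1 = q
    · simp only [h1]
      simp [h]
    · simp [h1]
  rw [hpred]

lemma pv_merge_step (c d : PySem.Dict (Int × Int) Int) (k : Int × Int) (v : Int)
    (h : c.keys.Nodup) :
    pvMerge (pvStep c (k, v)) d = pvMerge c (pvMerge (pvStep PySem.Dict.empty (k, v)) d) := by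
  have he : pvStep PySem.Dict.empty (k, v) = PySem.Dict.mk [(k, 0 + v)] := by rfl
  rw [he]
  have hm : pvMerge (PySem.Dict.mk [(k, 0 + v)]) d
      = PySem.Dict.mk ((k, 0 + v + d.getD k 0) :: d.items.filter (fun p => !(p.1 == k))) := by
    apply PySem.Dict.ext
    simp only [pvMerge, List.map_cons, List.map_nil, List.cons_append,
      List.nil_append, PySem.Dict.contains_mk]
    congr 1
    apply List.filter_congr
    intro p _
    simp [BEq.comm]
  rw [hm]
  set m : PySem.Dict (Int × Int) Int :=
    PySem.Dict.mk ((k, 0 + v + d.getD k 0) :: d.items.filter (fun p => !(p.1 == k))) with hmdef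
  have hgm : ∀ q : Int × Int, m.getD q 0 = if q = k then v + d.getD k 0 else d.getD q 0 := by
    intro q
    by_cases hq : q = k
    · subst hq
      simp [hmdef, PySem.Dict.getD, PySem.Dict.get?]
    · have hne : (k == q) = false := by
        simp only [beq_eq_false_iff_ne, ne_eq]
        exact fun hh => hq hh.symm
      calc m.getD q 0 = PySem.Dict.getD (PySem.Dict.mk (d.items.filter (fun p => !(p.1 == k)))) q 0 := by
            simp [hmdef, PySem.Dict.getD, PySem.Dict.get?, hne]
        _ = d.getD q 0 := pv_getD_filter_ne d.items k q 0 hq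
      simp [hq]
  by_cases hc : c.contains k = true
  · -- k already a key of c
    apply PySem.Dict.ext
    simp only [pvMerge, pvStep]
    have hitems : (c.insert k (c.getD k 0 + v)).items
        = c.items.map (fun p => if p.1 == k then (k, c.getD k 0 + v) else p) :=
      PySem.Dict.items_insert_of_contains c _ hc
    rw [hitems, List.map_map]
    congr 1
    · apply List.map_congr_left
      intro p hp
      by_cases hpk : p.1 = k
      · have hpe : (k, p.2) ∈ c.items := by rwa [← hpk, Prod.mk.eta]
        have hval : c.getD k 0 = p.2 := PySem.Dict.getD_of_mem_items c hpe h 0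
        simp only [Function.comp_apply, hpk, BEq.rfl, hgm, if_true]
        refine Prod.ext rfl ?_
        simp only [hval]
        ring
      · have hb : (p.1 == k) = false := by simpa using hpk
        simp only [Function.comp_apply, hb, Bool.false_eq_true, if_false, hgm, hpk, if_false]
    · rw [PySem.Dict.items]  -- m.items
      rw [List.filter_cons]
      have : (!(c.contains k)) = false := by simp [hc]
      simp only [this, Bool.false_eq_true, if_false, List.filter_filter]
      apply List.filter_congr
      intro p hp
      have : (c.insert k (c.getD k 0 + v)).contains p.1 = (p.1 == k || c.contains p.1) :=
        PySem.Dict.contains_insert _ _ _ _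
      rw [this]
      simp [Bool.and_comm]
  · -- k is a fresh key of c
    have hc' : c.contains k = false := by simpa using hc
    apply PySem.Dict.ext
    simp only [pvMerge, pvStep]
    have hitems : (c.insert k (c.getD k 0 + v)).items = c.items ++ [(k, c.getD k 0 + v)] :=
      PySem.Dict.items_insert_of_not_contains c _ hc'
    have hknotin : ∀ p ∈ c.items, p.1 ≠ k := by
      intro p hp hpk
      have : c.contains k = true := by
        simp only [PySem.Dict.contains]
        exact List.any_eq_true.mpr ⟨p, hp, by simp [hpk]⟩
      rw [this] at hc'; exact Bool.noConfusion hc'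
    rw [hitems, List.map_append]
    have hg0 : c.getD k 0 = 0 := PySem.Dict.getD_of_not_contains c 0 hc'
    rw [List.append_assoc]
    congr 1
    · apply List.map_congr_left
      intro p hp
      have hpk := hknotin p hp
      rw [hgm, if_neg hpk]
    · rw [PySem.Dict.items]  -- m.items
      rw [List.filter_cons]
      have : (!(c.contains k)) = true := by simp [hc']
      simp only [this, if_true]
      simp only [List.map_cons, List.map_nil, List.singleton_append, hg0, List.filter_filter]
      congr 1
      apply List.filter_congr
      intro p hp
      simp [PySem.Dict.contains_insert, Bool.and_comm]

def pvApply (s : List ((Int × Int) × Int)) (co : PySem.Dict (Int × Int) Int) : PySem.Dict (Int × Int) Int :=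
  s.foldl pvStep co
def pvColl (s : List ((Int × Int) × Int)) : PySem.Dict (Int × Int) Int := pvApply s PySem.Dict.empty

lemma pv_apply_nodup (s : List ((Int × Int) × Int)) :
    ∀ (c : PySem.Dict (Int × Int) Int), c.keys.Nodup → (pvApply s c).keys.Nodup := by
  induction s with
  | nil => intro c hc; exact hc
  | cons e rest ih =>
      intro c hc
      exact ih _ (PySem.Dict.nodup_keys_insert _ _ _ hc)

lemma pv_apply_eq_merge (s : List ((Int × Int) × Int)) :
    ∀ (c : PySem.Dict (Int × Int) Int), c.keys.Nodup → pvApply s c = pvMerge c (pvColl s) := by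
  induction s with
  | nil => intro c hc; exact (pv_merge_empty c).symm
  | cons e rest ih =>
      intro c hc
      obtain ⟨k, v⟩ := e
      have h1 : pvApply ((k, v) :: rest) c = pvApply rest (pvStep c (k, v)) := rfl
      have hnd : (pvStep c (k, v)).keys.Nodup := PySem.Dict.nodup_keys_insert _ _ _ hc
      have hnde : (pvStep PySem.Dict.empty (k, v)).keys.Nodup := by
        apply PySem.Dict.nodup_keys_insert
        simp [PySem.Dict.empty, PySem.Dict.keys]
      rw [h1, ih _ hnd, pv_merge_step c (pvColl rest) k v hc]
      congr 1
      have : pvColl ((k, v) :: rest) = pvApply rest (pvStep PySem.Dict.empty (k, v)) := rfl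
      rw [this, ih _ hnde]

lemma pv_coll_append (u v : List ((Int × Int) × Int)) :
    pvColl (u ++ v) = pvMerge (pvColl u) (pvColl v) := by
  have h1 : pvColl (u ++ v) = pvApply v (pvColl u) := by
    simp [pvColl, pvApply, List.foldl_append]
  rw [h1, pv_apply_eq_merge v (pvColl u) (pv_apply_nodup u _ (by simp [PySem.Dict.empty, PySem.Dict.keys]))]

lemma pv_apply_fresh : ∀ (s : List ((Int × Int) × Int)) (co : PySem.Dict (Int × Int) Int),
    (∀ p ∈ s, co.contains p.1 = false) → (s.map Prod.fst).Nodup →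
    pvApply s co = PySem.Dict.mk (co.items ++ s) := by
  intro s
  induction s with
  | nil => intro co _ _; apply PySem.Dict.ext; simp [pvApply]
  | cons e rest ih =>
      intro co hfresh hnd
      obtain ⟨k, v⟩ := e
      have hck : co.contains k = false := hfresh (k, v) (by simp)
      have hstep : pvStep co (k, v) = co.insert k v := by
        simp [pvStep, PySem.Dict.getD_of_not_contains co 0 hck]
      have hitems : (co.insert k v).items = co.items ++ [(k, v)] :=
        PySem.Dict.items_insert_of_not_contains co v hck
      have h1 : pvApply ((k, v) :: rest) co = pvApply rest (co.insert k v) := by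
        show pvApply rest (pvStep co (k, v)) = _
        rw [hstep]
      rw [h1, ih (co.insert k v) ?_ (by simpa using hnd.of_cons)]
      · apply PySem.Dict.ext
        simp [hitems, List.append_assoc]
      · intro p hp
        rw [PySem.Dict.contains_insert]
        have h2 : p.1 ≠ k := by
          simp only [List.map_cons, List.nodup_cons] at hnd
          intro hh
          exact hnd.1 (hh ▸ List.mem_map_of_mem hp)
        simp [h2, hfresh p (List.mem_cons_of_mem _ hp)]

def pvPairs : List Int → List (Int × Int)
  | [] => []
  | x :: t => t.map (fun y => (x, y)) ++ pvPairs t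
def pvBlk (p : Int × Int) (v : Int) : List ((Int × Int) × Int) := [(p, v), ((p.2, p.1), v)]
def pvKL (L : List (Int × Int)) : List (Int × Int) := L.flatMap (fun p => [p, (p.2, p.1)])

lemma pv_mem_pairs : ∀ (D : List Int) (p : Int × Int), p ∈ pvPairs D → p.1 ∈ D ∧ p.2 ∈ D := by
  intro D
  induction D with
  | nil => intro p hp; simp [pvPairs] at hp
  | cons x t ih =>
      intro p hp
      simp only [pvPairs, List.mem_append, List.mem_map] at hp
      rcases hp with ⟨y, hy, rfl⟩ | hp
      · exact ⟨by simp, by simp [hy]⟩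
      · exact ⟨List.mem_cons_of_mem _ (ih p hp).1, List.mem_cons_of_mem _ (ih p hp).2⟩

lemma pv_pairs_filter (f : Int → Bool) :
    ∀ (D : List Int), pvPairs (D.filter f) = (pvPairs D).filter (fun p => f p.1 && f p.2) := by
  intro D
  induction D with
  | nil => rfl
  | cons x t ih =>
      by_cases hx : f x
      · simp only [List.filter_cons, hx, if_pos, pvPairs, ih, List.filter_append]
        congr 1
        rw [List.filter_map]
        congr 1
        apply List.filter_congr
        intro y _
        simp [hx]
      · simp only [List.filter_cons, hx, Bool.false_eq_true, if_false, pvPairs, ih, List.filter_append]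
        have : (pvPairs t).filter (fun p => f p.1 && f p.2) = [] ++ (pvPairs t).filter (fun p => f p.1 && f p.2) := rfl
        rw [this]
        congr 1
        rw [List.filter_map]
        have : ((fun p : Int × Int => f p.1 && f p.2) ∘ fun y => (x, y)) = fun _ => false := by
          funext y; simp [hx]
        rw [this]
        simp

lemma pv_pairs_ne : ∀ (D : List Int), D.Nodup → ∀ p ∈ pvPairs D, p.1 ≠ p.2 := by
  intro D
  induction D with
  | nil => intro _ p hp; simp [pvPairs] at hp
  | cons x t ih =>
      intro hnd p hp
      simp only [pvPairs, List.mem_append, List.mem_map] at hp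
      rcases hp with ⟨y, hy, rfl⟩ | hp
      · intro hh
        simp only at hh
        exact (List.nodup_cons.mp hnd).1 (hh ▸ hy)
      · exact ih (List.nodup_cons.mp hnd).2 p hp

lemma pv_pairs_total : ∀ (D : List Int) (u w : Int), u ∈ D → w ∈ D → u ≠ w →
    (u, w) ∈ pvPairs D ∨ (w, u) ∈ pvPairs D := by
  intro D
  induction D with
  | nil => intro u w hu; simp at hu
  | cons x t ih =>
      intro u w hu hw hne
      rcases List.mem_cons.mp hu with rfl | hu'
      · have hw' : w ∈ t := by
          rcases List.mem_cons.mp hw with rfl | h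
          · exact absurd rfl hne
          · exact h
        left
        simp only [pvPairs, List.mem_append, List.mem_map]
        exact Or.inl ⟨w, hw', rfl⟩
      · rcases List.mem_cons.mp hw with rfl | hw'
        · right
          simp only [pvPairs, List.mem_append, List.mem_map]
          exact Or.inl ⟨u, hu', rfl⟩
        · rcases ih u w hu' hw' hne with h | h
          · left; simp only [pvPairs, List.mem_append]; exact Or.inr h
          · right; simp only [pvPairs, List.mem_append]; exact Or.inr h

lemma pv_foldl_add_set : ∀ (l s : List Int),
    l.foldl PySem.Set.add s = s ++ (l.foldl PySem.Set.add []).filter (fun y => !(s.contains y)) := by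
  intro l
  induction l with
  | nil => intro s; simp
  | cons a l' ih =>
      intro s
      have hsing : ([] : List Int).foldl PySem.Set.add [] = [] := rfl
      have h1 : (a :: l').foldl PySem.Set.add s = l'.foldl PySem.Set.add (PySem.Set.add s a) := rfl
      have h2 : (a :: l').foldl PySem.Set.add [] = l'.foldl PySem.Set.add [a] := rfl
      rw [h1, h2, ih (PySem.Set.add s a), ih [a]]
      by_cases ha : a ∈ s
      · have hc : PySem.Set.add s a = s := by simp [PySem.Set.add, PySem.Set.contains, ha]
        rw [hc]
        rw [List.filter_append]
        have hfa : ([a].filter (fun y => !(s.contains y))) = [] := by simp [ha]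
        rw [hfa, List.nil_append, List.filter_filter]
        congr 1
        apply List.filter_congr
        intro y _
        by_cases hy : y = a
        · subst hy; simp [ha]
        · simp [hy]
      · have hc : PySem.Set.add s a = s ++ [a] := by simp [PySem.Set.add, PySem.Set.contains, ha]
        rw [hc, List.append_assoc]
        congr 1
        rw [List.filter_append]
        have hfa : ([a].filter (fun y => !(s.contains y))) = [a] := by simp [ha]
        rw [hfa, List.filter_filter]
        congr 1
        apply List.filter_congr
        intro y _
        by_cases hy : y = a
        · subst hy; simp [ha]
        · simp [hy]

lemma pv_ofList_cons (x : Int) (l : List Int) :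
    PySem.Set.ofList (x :: l) = x :: (PySem.Set.ofList l).filter (fun y => y != x) := by
  have h1 : PySem.Set.ofList (x :: l) = l.foldl PySem.Set.add [x] := rfl
  rw [h1, pv_foldl_add_set l [x]]
  have : PySem.Set.ofList l = l.foldl PySem.Set.add [] := rfl
  rw [← this]
  simp only [List.singleton_append, List.cons.injEq, true_and]
  apply List.filter_congr
  intro y _
  by_cases hy : y = x
  · subst hy; simp
  · simp [hy]

lemma pv_keys_flatMap_blk (L : List (Int × Int)) (val : Int × Int → Int) :
    (L.flatMap (fun p => pvBlk p (val p))).map Prod.fst = pvKL L := by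
  induction L with
  | nil => rfl
  | cons p rest ih =>
      have h1 : pvKL (p :: rest) = [p, (p.2, p.1)] ++ pvKL rest := by simp [pvKL]
      have h2 : (List.flatMap (fun p => pvBlk p (val p)) (p :: rest)).map Prod.fst
          = (pvBlk p (val p)).map Prod.fst
            ++ (List.flatMap (fun p => pvBlk p (val p)) rest).map Prod.fst := by
        simp
      rw [h1, h2, ih]
      rfl

lemma pv_KL_mem (L : List (Int × Int)) (q : Int × Int) :
    q ∈ pvKL L ↔ q ∈ L ∨ (q.2, q.1) ∈ L := by
  simp only [pvKL, List.mem_flatMap, List.mem_cons, List.not_mem_nil]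
  constructor
  · rintro ⟨p, hp, rfl | h⟩
    · exact Or.inl hp
    · rcases h with rfl | h
      · exact Or.inr (by simpa using hp)
      · simp at h
  · rintro (h | h)
    · exact ⟨q, h, Or.inl rfl⟩
    · exact ⟨(q.2, q.1), h, Or.inr (Or.inl (by simp))⟩

lemma pv_KH_nodup : ∀ (A : List Int) (x : Int), x ∉ A → A.Nodup →
    (pvKL (A.map (fun a => (x, a)))).Nodup := by
  intro A
  induction A with
  | nil => intro x _ _; simp [pvKL]
  | cons a A' ih =>
      intro x hx hnd
      have hxa : x ≠ a := fun h => hx (h ▸ List.mem_cons_self)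
      have hxA' : x ∉ A' := fun h => hx (List.mem_cons_of_mem _ h)
      have haA' : a ∉ A' := (List.nodup_cons.mp hnd).1
      have hsplit : pvKL ((a :: A').map (fun b => (x, b)))
          = [(x, a), (a, x)] ++ pvKL (A'.map (fun b => (x, b))) := by simp [pvKL]
      rw [hsplit, List.nodup_append]
      refine ⟨?_, ih x hxA' (List.nodup_cons.mp hnd).2, ?_⟩
      · simp only [List.nodup_cons, List.mem_singleton, List.nodup_nil]
        refine ⟨?_, by simp, trivial⟩
        intro h
        exact hxa (by simpa using congrArg Prod.fst h)
      · intro qa hqa qb hqb heq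
        subst heq
        have hmem := (pv_KL_mem _ qa).mp hqb
        simp only [List.mem_cons, List.not_mem_nil, or_false] at hqa
        rcases hqa with rfl | rfl
        · rcases hmem with h | h
          · obtain ⟨b, hb, hqe⟩ := List.mem_map.mp h
            -- hqe : (x, b) = (x, a)
            have hba : b = a := by simpa using congrArg Prod.snd hqe
            exact haA' (hba ▸ hb)
          · obtain ⟨b, hb, hqe⟩ := List.mem_map.mp h
            -- hqe : (x, b) = (a, x)
            exact hxa (by simpa using congrArg Prod.fst hqe)
        · rcases hmem with h | h
          · obtain ⟨b, hb, hqe⟩ := List.mem_map.mp h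
            -- hqe : (x, b) = (a, x)
            exact hxa (by simpa using congrArg Prod.fst hqe)
          · obtain ⟨b, hb, hqe⟩ := List.mem_map.mp h
            -- hqe : (x, b) = (x, a)
            have hba : b = a := by simpa using congrArg Prod.snd hqe
            exact haA' (hba ▸ hb)

lemma pv_KL_nodup : ∀ (D : List Int), D.Nodup → (pvKL (pvPairs D)).Nodup := by
  intro D
  induction D with
  | nil => intro _; simp [pvKL, pvPairs]
  | cons x t ih =>
      intro hnd
      obtain ⟨hxt, hndt⟩ := List.nodup_cons.mp hnd
      have hsplit : pvKL (pvPairs (x :: t)) = pvKL (t.map (fun y => (x, y))) ++ pvKL (pvPairs t) := by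
        simp [pvPairs, pvKL]
      rw [hsplit, List.nodup_append]
      refine ⟨pv_KH_nodup t x hxt hndt, ih hndt, ?_⟩
      intro qa hqa qb hqb heq
      subst heq
      have h1 := (pv_KL_mem _ qa).mp hqa
      have h2 := (pv_KL_mem _ qa).mp hqb
      have hxq : x = qa.1 ∨ x = qa.2 := by
        rcases h1 with h | h
        · obtain ⟨b, _, hqe⟩ := List.mem_map.mp h
          exact Or.inl (by simpa using congrArg Prod.fst hqe)
        · obtain ⟨b, _, hqe⟩ := List.mem_map.mp h
          exact Or.inr (by simpa using congrArg Prod.fst hqe)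
      have hq1t : qa.1 ∈ t ∧ qa.2 ∈ t := by
        rcases h2 with h | h
        · exact pv_mem_pairs t qa h
        · have := pv_mem_pairs t _ h
          exact ⟨this.2, this.1⟩
      rcases hxq with h | h
      · exact hxt (h ▸ hq1t.1)
      · exact hxt (h ▸ hq1t.2)

lemma pv_contains_mk (s : List ((Int × Int) × Int)) (q : Int × Int) :
    PySem.Dict.contains (PySem.Dict.mk s) q = decide (q ∈ s.map Prod.fst) := by
  rw [PySem.Dict.contains_mk]
  induction s with
  | nil => simp
  | cons p rest ih =>
      simp only [List.any_cons, ih, List.map_cons, List.mem_cons]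
      by_cases h : q = p.1
      · simp [h]
      · have hb : (p.1 == q) = false := by simpa using fun hh => h hh.symm
        simp [hb, h]

lemma pv_getD_mk (s : List ((Int × Int) × Int)) (q : Int × Int) (v : Int)
    (hnd : (s.map Prod.fst).Nodup) (hmem : (q, v) ∈ s) :
    PySem.Dict.getD (PySem.Dict.mk s) q 0 = v := by
  apply PySem.Dict.getD_of_mem_items (PySem.Dict.mk s) hmem
  simpa [PySem.Dict.keys] using hnd

lemma pv_getD_mk_none (s : List ((Int × Int) × Int)) (q : Int × Int)
    (h : q ∉ s.map Prod.fst) : PySem.Dict.getD (PySem.Dict.mk s) q 0 = 0 := by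
  apply PySem.Dict.getD_of_not_contains
  rw [pv_contains_mk]
  simpa using h

def pvSA (l : List Int) : List ((Int × Int) × Int) :=
  (pvPairs l).flatMap (fun p => if p.1 = p.2 then [] else pvBlk p 1)
def pvSB (c : Int → Int) (D : List Int) : List ((Int × Int) × Int) :=
  (pvPairs D).flatMap (fun p => pvBlk p (c p.1 * c p.2))
def pvCI (l : List Int) : Int → Int := fun v => (l.count v : Int)
def pvHdrSeq (x : Int) (T : List Int) : List ((Int × Int) × Int) :=
  T.flatMap (fun t => if x = t then [] else pvBlk (x, t) 1)
def pvHdr (x : Int) (T : List Int) : List ((Int × Int) × Int) :=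
  ((PySem.Set.ofList T).filter (fun y => y != x)).flatMap (fun a => pvBlk (x, a) (pvCI T a))

lemma pv_merge_empty_left (d : PySem.Dict (Int × Int) Int) : pvMerge PySem.Dict.empty d = d := by
  apply PySem.Dict.ext
  simp [pvMerge, PySem.Dict.empty, PySem.Dict.contains]

lemma pv_flatMap_congr {α β : Type} (l : List α) (f g : α → List β) (h : ∀ a ∈ l, f a = g a) :
    l.flatMap f = l.flatMap g := by
  induction l with
  | nil => rfl
  | cons a t ih =>
      simp only [List.flatMap_cons, h a List.mem_cons_self]
      rw [ih (fun b hb => h b (List.mem_cons_of_mem _ hb))]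

lemma pv_flatMap_filter_if {α β : Type} (l : List α) (p : α → Bool) (f : α → List β) :
    l.flatMap (fun a => if p a then f a else []) = (l.filter p).flatMap f := by
  induction l with
  | nil => rfl
  | cons a t ih =>
      by_cases h : p a
      · simp [h, ih]
      · simp [h, ih]

lemma pv_hdr_eq (x : Int) (T : List Int) :
    pvHdr x T = (((PySem.Set.ofList T).filter (fun y => y != x)).map (fun a => (x, a))).flatMap
      (fun p => pvBlk p (pvCI T p.2)) := by
  rw [List.flatMap_map]
  rfl

lemma pv_A_nodup (x : Int) (T : List Int) : ((PySem.Set.ofList T).filter (fun y => y != x)).Nodup :=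
  (PySem.Set.nodup_ofList T).filter _

lemma pv_A_not_mem (x : Int) (T : List Int) : x ∉ (PySem.Set.ofList T).filter (fun y => y != x) := by
  simp [List.mem_filter]

lemma pv_mem_A (x w : Int) (T : List Int) :
    w ∈ (PySem.Set.ofList T).filter (fun y => y != x) ↔ w ∈ T ∧ w ≠ x := by
  simp [List.mem_filter, PySem.Set.mem_ofList]

lemma pv_hdr_keys (x : Int) (T : List Int) :
    (pvHdr x T).map Prod.fst
      = pvKL (((PySem.Set.ofList T).filter (fun y => y != x)).map (fun a => (x, a))) := by
  rw [pv_hdr_eq, pv_keys_flatMap_blk]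

lemma pv_hdr_keys_nodup (x : Int) (T : List Int) : ((pvHdr x T).map Prod.fst).Nodup := by
  rw [pv_hdr_keys]
  exact pv_KH_nodup _ x (pv_A_not_mem x T) (pv_A_nodup x T)

lemma pv_mem_KH (x : Int) (A : List Int) (q : Int × Int) :
    q ∈ pvKL (A.map (fun a => (x, a))) ↔ (q.1 = x ∧ q.2 ∈ A) ∨ (q.2 = x ∧ q.1 ∈ A) := by
  rw [pv_KL_mem]
  constructor
  · rintro (h | h) <;> obtain ⟨b, hb, hqe⟩ := List.mem_map.mp h
    · exact Or.inl ⟨(congrArg Prod.fst hqe).symm, by rw [← hqe]; exact hb⟩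
    · refine Or.inr ⟨?_, ?_⟩
      · simpa using (congrArg Prod.fst hqe).symm
      · have : b = q.1 := by simpa using congrArg Prod.snd hqe
        exact this ▸ hb
  · rintro (⟨h1, h2⟩ | ⟨h1, h2⟩)
    · exact Or.inl (List.mem_map.mpr ⟨q.2, h2, by rw [← h1]⟩)
    · exact Or.inr (List.mem_map.mpr ⟨q.1, h2, by rw [← h1]⟩)

lemma pv_hdr_not_contains (x : Int) (T : List Int) (q : Int × Int)
    (h1 : q.1 ≠ x) (h2 : q.2 ≠ x) :
    PySem.Dict.contains (PySem.Dict.mk (pvHdr x T)) q = false := by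
  rw [pv_contains_mk, pv_hdr_keys]
  simp only [decide_eq_false_iff_not]
  rw [pv_mem_KH]
  rintro (⟨h, _⟩ | ⟨h, _⟩)
  · exact h1 h
  · exact h2 h

lemma pv_hdr_getD₁ (x : Int) (T : List Int) (w : Int) (hw : w ≠ x) :
    PySem.Dict.getD (PySem.Dict.mk (pvHdr x T)) (x, w) 0 = pvCI T w := by
  by_cases hmem : w ∈ T
  · apply pv_getD_mk _ _ _ (pv_hdr_keys_nodup x T)
    unfold pvHdr
    rw [List.mem_flatMap]
    exact ⟨w, (pv_mem_A x w T).mpr ⟨hmem, hw⟩, by simp [pvBlk]⟩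
  · have h0 : pvCI T w = 0 := by simp [pvCI, List.count_eq_zero_of_not_mem hmem]
    rw [h0]
    apply pv_getD_mk_none
    rw [pv_hdr_keys]
    rw [pv_mem_KH]
    rintro (⟨_, h⟩ | ⟨h, _⟩)
    · exact hmem ((pv_mem_A x w T).mp h).1
    · exact hw h

lemma pv_hdr_getD₂ (x : Int) (T : List Int) (w : Int) (hw : w ≠ x) :
    PySem.Dict.getD (PySem.Dict.mk (pvHdr x T)) (w, x) 0 = pvCI T w := by
  by_cases hmem : w ∈ T
  · apply pv_getD_mk _ _ _ (pv_hdr_keys_nodup x T)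
    unfold pvHdr
    rw [List.mem_flatMap]
    exact ⟨w, (pv_mem_A x w T).mpr ⟨hmem, hw⟩, by simp [pvBlk]⟩
  · have h0 : pvCI T w = 0 := by simp [pvCI, List.count_eq_zero_of_not_mem hmem]
    rw [h0]
    apply pv_getD_mk_none
    rw [pv_hdr_keys]
    rw [pv_mem_KH]
    rintro (⟨h, _⟩ | ⟨_, h⟩)
    · exact hw h
    · exact hmem ((pv_mem_A x w T).mp h).1

lemma pv_F_keys (c : Int → Int) (D : List Int) :
    (pvSB c D).map Prod.fst = pvKL (pvPairs D) := by
  unfold pvSB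
  rw [pv_keys_flatMap_blk]

lemma pv_F_keys_nodup (c : Int → Int) (D : List Int) (hD : D.Nodup) :
    ((pvSB c D).map Prod.fst).Nodup := by
  rw [pv_F_keys]; exact pv_KL_nodup D hD

lemma pv_F_getD (c : Int → Int) (D : List Int) (hD : D.Nodup) (hsym : ∀ u w, c u * c w = c w * c u)
    (u w : Int) (hu : u ∈ D) (hw : w ∈ D) (hne : u ≠ w) :
    PySem.Dict.getD (PySem.Dict.mk (pvSB c D)) (u, w) 0 = c u * c w := by
  rcases pv_pairs_total D u w hu hw hne with h | h
  · apply pv_getD_mk _ _ _ (pv_F_keys_nodup c D hD)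
    unfold pvSB
    rw [List.mem_flatMap]
    exact ⟨(u, w), h, by simp [pvBlk]⟩
  · rw [hsym u w]
    apply pv_getD_mk _ _ _ (pv_F_keys_nodup c D hD)
    unfold pvSB
    rw [List.mem_flatMap]
    exact ⟨(w, u), h, by simp [pvBlk]⟩

lemma pv_F_mem_keys (c : Int → Int) (D : List Int) (hD : D.Nodup) (q : Int × Int)
    (h : q ∈ (pvSB c D).map Prod.fst) : q.1 ∈ D ∧ q.2 ∈ D ∧ q.1 ≠ q.2 := by
  rw [pv_F_keys, pv_KL_mem] at h
  rcases h with h | h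
  · exact ⟨(pv_mem_pairs D q h).1, (pv_mem_pairs D q h).2, pv_pairs_ne D hD q h⟩
  · have hm := pv_mem_pairs D _ h
    have hne := pv_pairs_ne D hD _ h
    exact ⟨hm.2, hm.1, fun hh => hne (by simp [hh])⟩

lemma pv_F_getD0 (c : Int → Int) (D : List Int) (hD : D.Nodup) (q : Int × Int)
    (h : q.1 ∉ D ∨ q.2 ∉ D ∨ q.1 = q.2) :
    PySem.Dict.getD (PySem.Dict.mk (pvSB c D)) q 0 = 0 := by
  apply pv_getD_mk_none
  intro hmem
  have := pv_F_mem_keys c D hD q hmem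
  rcases h with h | h | h
  · exact h this.1
  · exact h this.2.1
  · exact this.2.2 h

lemma pv_sA_cons (x : Int) (T : List Int) : pvSA (x :: T) = pvHdrSeq x T ++ pvSA T := by
  unfold pvSA pvHdrSeq
  rw [show pvPairs (x :: T) = T.map (fun y => (x, y)) ++ pvPairs T from rfl]
  rw [List.flatMap_append, List.flatMap_map]

lemma pv_count_cons_ne (a x : Int) (T : List Int) (h : a ≠ x) : pvCI (x :: T) a = pvCI T a := by
  have : (x == a) = false := by simpa using fun hh => h hh.symm
  simp [pvCI, List.count_cons, this]

lemma pv_count_cons_self (x : Int) (T : List Int) : pvCI (x :: T) x = pvCI T x + 1 := by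
  simp [pvCI]

lemma pv_coll_hdrseq : ∀ (T : List Int) (x : Int), pvColl (pvHdrSeq x T) = PySem.Dict.mk (pvHdr x T) := by
  intro T
  induction T with
  | nil => intro x; apply PySem.Dict.ext; rfl
  | cons t T' ih =>
      intro x
      have hseq : pvHdrSeq x (t :: T') = (if x = t then [] else pvBlk (x, t) 1) ++ pvHdrSeq x T' := by
        simp [pvHdrSeq]
      rw [hseq, pv_coll_append, ih]
      by_cases hxt : x = t
      · subst hxt
        rw [if_pos rfl]
        rw [show pvColl ([] : List ((Int × Int) × Int)) = PySem.Dict.empty from rfl,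
          pv_merge_empty_left]
        apply PySem.Dict.ext
        show pvHdr x T' = pvHdr x (x :: T')
        unfold pvHdr
        rw [pv_ofList_cons]
        rw [List.filter_cons]
        simp only [bne_self_eq_false, Bool.false_eq_true, if_false, List.filter_filter,
          Bool.and_self]
        apply pv_flatMap_congr
        intro a ha
        have hax : a ≠ x := ((pv_mem_A x a T').mp ha).2
        rw [pv_count_cons_ne a x T' hax]
      · -- x ≠ t
        have hblk : pvColl (pvBlk (x, t) 1) = PySem.Dict.mk (pvBlk (x, t) 1) := by
          have := pv_apply_fresh (pvBlk (x, t) 1) PySem.Dict.empty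
            (by intro p _; rfl)
            (by
              simp only [pvBlk, List.map_cons, List.map_nil, List.nodup_cons, List.mem_singleton,
                List.not_mem_nil, List.nodup_nil]
              refine ⟨?_, by simp, trivial⟩
              intro h
              exact hxt (by simpa using congrArg Prod.fst h))
          rw [pvColl, this]
          rfl
        rw [if_neg hxt, hblk]
        -- now compute the merge
        apply PySem.Dict.ext
        show (pvBlk (x, t) 1).map _ ++ (pvHdr x T').filter _ = pvHdr x (t :: T')
        have htx : t ≠ x := fun h => hxt h.symm
        have hmap : (pvBlk (x, t) 1).map
            (fun p => (p.1, p.2 + PySem.Dict.getD (PySem.Dict.mk (pvHdr x T')) p.1 0))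
            = pvBlk (x, t) (pvCI (t :: T') t) := by
          simp only [pvBlk, List.map_cons, List.map_nil]
          rw [pv_hdr_getD₁ x T' t htx, pv_hdr_getD₂ x T' t htx, pv_count_cons_self]
          simp [Int.add_comm]
        have hcont : ∀ q : Int × Int,
            PySem.Dict.contains (PySem.Dict.mk (pvBlk (x, t) 1)) q
              = decide (q = (x, t) ∨ q = (t, x)) := by
          intro q
          rw [pv_contains_mk]
          simp [pvBlk]
        have hfilter : (pvHdr x T').filter
            (fun p => !(PySem.Dict.contains (PySem.Dict.mk (pvBlk (x, t) 1)) p.1))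
            = (((PySem.Set.ofList T').filter (fun y => y != x)).filter (fun a => a != t)).flatMap
                (fun a => pvBlk (x, a) (pvCI T' a)) := by
          unfold pvHdr
          rw [List.filter_flatMap]
          conv_rhs => rw [← pv_flatMap_filter_if]
          apply pv_flatMap_congr
          intro a ha
          have hax : a ≠ x := ((pv_mem_A x a T').mp ha).2
          by_cases hat : a = t
          · subst hat
            simp [pvBlk]
          · have hb : (a != t) = true := by simpa using hat
            rw [if_pos hb]
            have c1 : PySem.Dict.contains (PySem.Dict.mk (pvBlk (x, t) 1)) (x, a) = false := by
              rw [pv_contains_mk]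
              simp only [pvBlk, List.map_cons, List.map_nil, decide_eq_false_iff_not,
                List.mem_cons, List.not_mem_nil, or_false]
              rintro (h | h)
              · exact hat (by simpa using congrArg Prod.snd h)
              · exact hxt (by simpa using congrArg Prod.fst h)
            have c2 : PySem.Dict.contains (PySem.Dict.mk (pvBlk (x, t) 1)) (a, x) = false := by
              rw [pv_contains_mk]
              simp only [pvBlk, List.map_cons, List.map_nil, decide_eq_false_iff_not,
                List.mem_cons, List.not_mem_nil, or_false]
              rintro (h | h)
              · exact hax (by simpa using congrArg Prod.fst h)
              · exact hat (by simpa using congrArg Prod.fst h)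
            simp [pvBlk]
            exact ⟨⟨fun h => hat h.symm, fun _ hxa => hax hxa.symm⟩,
              fun _ h => hxt h.symm, fun h => hat h.symm⟩
        rw [hmap, hfilter]
        -- now the right-hand side
        unfold pvHdr
        rw [pv_ofList_cons, List.filter_cons]
        have hkeep : (t != x) = true := by simpa using htx
        rw [if_pos hkeep]
        rw [show ∀ (a : Int) (l : List Int) (f : Int → List ((Int × Int) × Int)),
          (a :: l).flatMap f = f a ++ l.flatMap f from fun a l f => rfl]
        congr 1
        rw [List.filter_filter, List.filter_filter]
        rw [List.filter_congr (fun a _ => Bool.and_comm (a != t) (a != x))]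
        apply pv_flatMap_congr
        intro a ha
        rw [List.mem_filter] at ha
        have hat : a ≠ t := by
          have h2 := ha.2
          simp only [Bool.and_eq_true, bne_iff_ne, ne_eq] at h2
          exact h2.2
        rw [pv_count_cons_ne a t T' hat]

lemma pv_hdr_contains (x : Int) (T : List Int) (q : Int × Int) :
    PySem.Dict.contains (PySem.Dict.mk (pvHdr x T)) q
      = decide ((q.1 = x ∧ q.2 ∈ (PySem.Set.ofList T).filter (fun y => y != x))
          ∨ (q.2 = x ∧ q.1 ∈ (PySem.Set.ofList T).filter (fun y => y != x))) := by
  rw [pv_contains_mk, pv_hdr_keys]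
  exact decide_eq_decide.mpr (pv_mem_KH x _ q)

lemma pv_merge_main (x : Int) (T : List Int) :
    pvMerge (PySem.Dict.mk (pvHdr x T)) (PySem.Dict.mk (pvSB (pvCI T) (PySem.Set.ofList T)))
      = PySem.Dict.mk (pvSB (pvCI (x :: T)) (PySem.Set.ofList (x :: T))) := by
  have hD : (PySem.Set.ofList T).Nodup := PySem.Set.nodup_ofList T
  have hsym : ∀ u w : Int, pvCI T u * pvCI T w = pvCI T w * pvCI T u := fun u w => Int.mul_comm _ _
  apply PySem.Dict.ext
  show (pvHdr x T).map _ ++ (pvSB (pvCI T) (PySem.Set.ofList T)).filter _ = _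
  -- the lookup of any (x,a)/(a,x) key in the tail dict is (count x) * (count a)
  have hget1 : ∀ a : Int, a ∈ (PySem.Set.ofList T).filter (fun y => y != x) →
      PySem.Dict.getD (PySem.Dict.mk (pvSB (pvCI T) (PySem.Set.ofList T))) (x, a) 0
        = pvCI T x * pvCI T a := by
    intro a ha
    obtain ⟨haD, hax⟩ := (pv_mem_A x a T).mp ha
    by_cases hx : x ∈ T
    · exact pv_F_getD (pvCI T) _ hD hsym x a ((PySem.Set.mem_ofList T x).mpr hx)
        ((PySem.Set.mem_ofList T a).mpr haD) (fun h => hax h.symm)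
    · have h0 : pvCI T x = 0 := by simp [pvCI, List.count_eq_zero_of_not_mem hx]
      rw [h0, Int.zero_mul]
      exact pv_F_getD0 (pvCI T) _ hD (x, a)
        (Or.inl (fun h => hx ((PySem.Set.mem_ofList T x).mp h)))
  have hget2 : ∀ a : Int, a ∈ (PySem.Set.ofList T).filter (fun y => y != x) →
      PySem.Dict.getD (PySem.Dict.mk (pvSB (pvCI T) (PySem.Set.ofList T))) (a, x) 0
        = pvCI T x * pvCI T a := by
    intro a ha
    obtain ⟨haD, hax⟩ := (pv_mem_A x a T).mp ha
    by_cases hx : x ∈ T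
    · rw [pv_F_getD (pvCI T) _ hD hsym a x ((PySem.Set.mem_ofList T a).mpr haD)
        ((PySem.Set.mem_ofList T x).mpr hx) hax]
      exact Int.mul_comm _ _
    · have h0 : pvCI T x = 0 := by simp [pvCI, List.count_eq_zero_of_not_mem hx]
      rw [h0, Int.zero_mul]
      exact pv_F_getD0 (pvCI T) _ hD (a, x)
        (Or.inr (Or.inl (fun h => hx ((PySem.Set.mem_ofList T x).mp h))))
  -- map part
  have hmap : (pvHdr x T).map
      (fun p => (p.1, p.2 + PySem.Dict.getD (PySem.Dict.mk (pvSB (pvCI T) (PySem.Set.ofList T))) p.1 0))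
      = ((PySem.Set.ofList T).filter (fun y => y != x)).flatMap
          (fun a => pvBlk (x, a) (pvCI (x :: T) x * pvCI (x :: T) a)) := by
    unfold pvHdr
    rw [List.map_flatMap]
    apply pv_flatMap_congr
    intro a ha
    have hax : a ≠ x := ((pv_mem_A x a T).mp ha).2
    simp only [pvBlk, List.map_cons, List.map_nil]
    rw [hget1 a ha, hget2 a ha, pv_count_cons_self, pv_count_cons_ne a x T hax]
    have : pvCI T a + pvCI T x * pvCI T a = (pvCI T x + 1) * pvCI T a := by ring
    rw [this]
  -- filter part
  have hfilter : (pvSB (pvCI T) (PySem.Set.ofList T)).filter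
      (fun p => !(PySem.Dict.contains (PySem.Dict.mk (pvHdr x T)) p.1))
      = (pvPairs ((PySem.Set.ofList T).filter (fun y => y != x))).flatMap
          (fun p => pvBlk p (pvCI (x :: T) p.1 * pvCI (x :: T) p.2)) := by
    unfold pvSB
    rw [List.filter_flatMap]
    have hstep : ∀ p ∈ pvPairs (PySem.Set.ofList T),
        (pvBlk p (pvCI T p.1 * pvCI T p.2)).filter
          (fun e => !(PySem.Dict.contains (PySem.Dict.mk (pvHdr x T)) e.1))
        = if (p.1 != x && p.2 != x) then pvBlk p (pvCI T p.1 * pvCI T p.2) else [] := by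
      intro p hp
      have hmem := pv_mem_pairs _ p hp
      have hne := pv_pairs_ne _ hD p hp
      by_cases h1 : p.1 = x
      · have c1 : PySem.Dict.contains (PySem.Dict.mk (pvHdr x T)) p = true := by
          rw [pv_hdr_contains]
          refine decide_eq_true (Or.inl ⟨h1, ?_⟩)
          exact (pv_mem_A x p.2 T).mpr ⟨(PySem.Set.mem_ofList T p.2).mp hmem.2, fun h => hne (h1 ▸ h ▸ rfl)⟩
        have c2 : PySem.Dict.contains (PySem.Dict.mk (pvHdr x T)) (p.2, p.1) = true := by
          rw [pv_hdr_contains]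
          refine decide_eq_true (Or.inr ⟨h1, ?_⟩)
          exact (pv_mem_A x p.2 T).mpr ⟨(PySem.Set.mem_ofList T p.2).mp hmem.2, fun h => hne (h1 ▸ h ▸ rfl)⟩
        have hb : (p.1 != x && p.2 != x) = false := by simp [h1]
        rw [hb, if_neg (by simp)]
        simp only [pvBlk, List.filter_cons, List.filter_nil]
        rw [c1, c2]
        simp
      · by_cases h2 : p.2 = x
        · have c1 : PySem.Dict.contains (PySem.Dict.mk (pvHdr x T)) p = true := by
            rw [pv_hdr_contains]
            refine decide_eq_true (Or.inr ⟨h2, ?_⟩)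
            exact (pv_mem_A x p.1 T).mpr ⟨(PySem.Set.mem_ofList T p.1).mp hmem.1, h1⟩
          have c2 : PySem.Dict.contains (PySem.Dict.mk (pvHdr x T)) (p.2, p.1) = true := by
            rw [pv_hdr_contains]
            refine decide_eq_true (Or.inl ⟨h2, ?_⟩)
            exact (pv_mem_A x p.1 T).mpr ⟨(PySem.Set.mem_ofList T p.1).mp hmem.1, h1⟩
          have hb : (p.1 != x && p.2 != x) = false := by simp [h2]
          rw [hb, if_neg (by simp)]
          simp only [pvBlk, List.filter_cons, List.filter_nil]
          rw [c1, c2]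
          simp
        · have c1 : PySem.Dict.contains (PySem.Dict.mk (pvHdr x T)) p = false :=
            pv_hdr_not_contains x T p h1 h2
          have c2 : PySem.Dict.contains (PySem.Dict.mk (pvHdr x T)) (p.2, p.1) = false :=
            pv_hdr_not_contains x T (p.2, p.1) h2 h1
          have hb : (p.1 != x && p.2 != x) = true := by simp [h1, h2]
          rw [hb, if_pos rfl]
          simp only [pvBlk, List.filter_cons, List.filter_nil]
          rw [c1, c2]
          simp
    rw [pv_flatMap_congr _ _ _ hstep, pv_flatMap_filter_if, ← pv_pairs_filter (fun y => y != x)]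
    apply pv_flatMap_congr
    intro p hp
    have hmem := pv_mem_pairs _ p hp
    have h1 : p.1 ≠ x := ((pv_mem_A x p.1 T).mp hmem.1).2
    have h2 : p.2 ≠ x := ((pv_mem_A x p.2 T).mp hmem.2).2
    rw [pv_count_cons_ne p.1 x T h1, pv_count_cons_ne p.2 x T h2]
  rw [hmap, hfilter]
  -- assemble the right-hand side
  rw [show PySem.Dict.items (PySem.Dict.mk (pvSB (pvCI (x :: T)) (PySem.Set.ofList (x :: T))))
    = pvSB (pvCI (x :: T)) (PySem.Set.ofList (x :: T)) from rfl]
  unfold pvSB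
  rw [pv_ofList_cons]
  rw [show pvPairs (x :: (PySem.Set.ofList T).filter (fun y => y != x))
    = ((PySem.Set.ofList T).filter (fun y => y != x)).map (fun y => (x, y))
      ++ pvPairs ((PySem.Set.ofList T).filter (fun y => y != x)) from rfl]
  rw [List.flatMap_append, List.flatMap_map]

lemma pv_coll_sB (l : List Int) :
    pvColl (pvSB (pvCI l) (PySem.Set.ofList l)) = PySem.Dict.mk (pvSB (pvCI l) (PySem.Set.ofList l)) := by
  rw [pvColl, pv_apply_fresh _ _ (fun p _ => rfl)
    (pv_F_keys_nodup (pvCI l) _ (PySem.Set.nodup_ofList l))]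
  rfl

lemma pv_main : ∀ (l : List Int),
    pvColl (pvSA l) = PySem.Dict.mk (pvSB (pvCI l) (PySem.Set.ofList l)) := by
  intro l
  induction l with
  | nil => apply PySem.Dict.ext; rfl
  | cons x T ih =>
      rw [pv_sA_cons, pv_coll_append, pv_coll_hdrseq, ih, pv_merge_main]

lemma pv_inner_agree (l : List Int) (co : PySem.Dict (Int × Int) Int) (h : co.keys.Nodup) :
    pvApply (pvSA l) co = pvApply (pvSB (pvCI l) (PySem.Set.ofList l)) co := by
  rw [pv_apply_eq_merge _ co h, pv_apply_eq_merge _ co h, pv_main, ← pv_coll_sB]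

-- head-against-tail pair traversal
def pvTails (g : PySem.Dict (Int × Int) Int → Int → Int → PySem.Dict (Int × Int) Int) :
    List Int → PySem.Dict (Int × Int) Int → PySem.Dict (Int × Int) Int
  | [], co => co
  | x :: t, co => pvTails g t (t.foldl (fun co y => g co x y) co)

lemma pvTails_eq_pairs (g : PySem.Dict (Int × Int) Int → Int → Int → PySem.Dict (Int × Int) Int) :
    ∀ (l : List Int) co, pvTails g l co = (pvPairs l).foldl (fun co p => g co p.1 p.2) co := by
  intro l
  induction l with
  | nil => intro co; rfl
  | cons x t ih =>
      intro co
      show pvTails g t _ = _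
      rw [ih]
      simp only [pvPairs, List.foldl_append, List.foldl_map]

-- ---- loop normalizations ----
lemma pv_range_inner (g : PySem.Dict (Int × Int) Int → Int → PySem.Dict (Int × Int) Int) :
    ∀ (l full : List Int) (s : Nat), full.drop s = l → ∀ co,
      (PySem.List.pyRange (s : Int) (full.length : Int) 1).foldl
        (fun co j => g co (PySem.List.pyGetD full j 0)) co = l.foldl g co := by
  intro l
  induction l with
  | nil =>
      intro full s h co
      have hl : full.length ≤ s := List.drop_eq_nil_iff.mp h
      have hr : PySem.List.pyRange (s : Int) (full.length : Int) 1 = [] := by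
        simp only [PySem.List.pyRange]
        have : ¬ ((s : Int) < (full.length : Int)) := by exact_mod_cast not_lt.mpr hl
        simp [this]
      rw [hr]; rfl
  | cons x t ih =>
      intro full s h co
      have hs : s < full.length := by
        by_contra hc
        push Not at hc
        rw [List.drop_eq_nil_iff.mpr hc] at h
        simp at h
      rw [PySem.List.pyRange_one_cons (by exact_mod_cast hs)]
      simp only [List.foldl_cons]
      have hx : PySem.List.pyGetD full (s : Int) 0 = x := by
        rw [PySem.List.pyGetD_natCast]
        have h2 : full[s]? = some x := by
          have := (List.getElem?_drop (xs := full) (i := s) (j := 0)).symm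
          simp [h] at this; simpa using this
        simp [List.getD_eq_getElem?_getD, h2]
      rw [hx]
      have hdrop : full.drop (s + 1) = t := by
        have := List.drop_drop (i := 1) (j := s) (l := full)
        rw [h] at this
        simpa [Nat.add_comm] using this.symm
      have hcast : ((s : Int) + 1) = (((s + 1 : Nat)) : Int) := by push_cast; ring
      rw [hcast]
      exact ih full (s + 1) hdrop (g co x)

lemma pv_range_double (g : PySem.Dict (Int × Int) Int → Int → Int → PySem.Dict (Int × Int) Int) :
    ∀ (l full : List Int) (s : Nat), full.drop s = l → ∀ co,
      (PySem.List.pyRange (s : Int) (full.length : Int) 1).foldl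
        (fun co i => (PySem.List.pyRange (i + 1) (full.length : Int) 1).foldl
          (fun co j => g co (PySem.List.pyGetD full i 0) (PySem.List.pyGetD full j 0)) co) co
      = pvTails g l co := by
  intro l
  induction l with
  | nil =>
      intro full s h co
      have hl : full.length ≤ s := List.drop_eq_nil_iff.mp h
      have hr : PySem.List.pyRange (s : Int) (full.length : Int) 1 = [] := by
        simp only [PySem.List.pyRange]
        have : ¬ ((s : Int) < (full.length : Int)) := by exact_mod_cast not_lt.mpr hl
        simp [this]
      rw [hr]; rfl
  | cons x t ih =>
      intro full s h co
      have hs : s < full.length := by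
        by_contra hc
        push Not at hc
        rw [List.drop_eq_nil_iff.mpr hc] at h
        simp at h
      have hdrop : full.drop (s + 1) = t := by
        have := List.drop_drop (i := 1) (j := s) (l := full)
        rw [h] at this
        simpa [Nat.add_comm] using this.symm
      have hx : PySem.List.pyGetD full (s : Int) 0 = x := by
        rw [PySem.List.pyGetD_natCast]
        have h2 : full[s]? = some x := by
          have := (List.getElem?_drop (xs := full) (i := s) (j := 0)).symm
          simp [h] at this; simpa using this
        simp [List.getD_eq_getElem?_getD, h2]
      have hcast : ((s : Int) + 1) = (((s + 1 : Nat)) : Int) := by push_cast; ring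
      rw [PySem.List.pyRange_one_cons (by exact_mod_cast hs)]
      simp only [List.foldl_cons]
      rw [hx, hcast, pv_range_inner (fun co y => g co x y) t full (s + 1) hdrop co]
      show _ = pvTails g t _
      exact ih full (s + 1) hdrop _

lemma pv_enum_double (g : PySem.Dict (Int × Int) Int → Int → Int → PySem.Dict (Int × Int) Int) :
    ∀ (l full : List Int) (s : Nat), full.drop s = l → ∀ co,
      (PySem.List.enumerate l (s : Int)).foldl
        (fun co ia => (PySem.List.slice full (some (ia.1 + 1)) none).foldl
          (fun co b => g co ia.2 b) co) co
      = pvTails g l co := by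
  intro l
  induction l with
  | nil => intro full s h co; rfl
  | cons x t ih =>
      intro full s h co
      have hdrop : full.drop (s + 1) = t := by
        have := List.drop_drop (i := 1) (j := s) (l := full)
        rw [h] at this
        simpa [Nat.add_comm] using this.symm
      show (((s : Int), x) :: PySem.List.enumerate t ((s : Int) + 1)).foldl _ _ = _
      simp only [List.foldl_cons]
      have hslice : PySem.List.slice full (some ((s : Int) + 1)) none = t := by
        rw [PySem.List.slice_from full (by positivity)]
        have : ((s : Int) + 1).toNat = s + 1 := by omega
        rw [this, hdrop]
      rw [hslice]
      have hcast : ((s : Int) + 1) = (((s + 1 : Nat)) : Int) := by push_cast; ring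
      rw [hcast]
      show _ = pvTails g t _
      exact ih full (s + 1) hdrop _


-- ---- the two inner loops are pvApply of their sequences ----
def pvInnerA (co : PySem.Dict (Int × Int) Int) (plist : List Int) : PySem.Dict (Int × Int) Int :=
  let n : Int := (plist.length : Int)
  if n < 2 then co
  else
    (PySem.List.pyRange 0 n 1).foldl (fun co i =>
      let a : Int := PySem.List.pyGetD plist i 0
      (PySem.List.pyRange (i + 1) n 1).foldl (fun co j =>
        let b : Int := PySem.List.pyGetD plist j 0
        if a = b then co
        else
          let co1 := co.modify (a, b) 0 (fun v => v + 1)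
          co1.modify (b, a) 0 (fun v => v + 1)) co) co

def pvInnerB (co : PySem.Dict (Int × Int) Int) (plist : List Int) : PySem.Dict (Int × Int) Int :=
  let cnt : PySem.Dict Int Int :=
    plist.foldl (fun d p => d.insert p (d.getD p 0 + 1)) PySem.Dict.empty
  let pids : List Int := cnt.keys
  (PySem.List.enumerate pids).foldl (fun co ia =>
    (PySem.List.slice pids (some (ia.1 + 1)) none).foldl (fun co b =>
      let k : Int := cnt.getD ia.2 0 * cnt.getD b 0
      let co1 := co.insert (ia.2, b) (co.getD (ia.2, b) 0 + k)
      co1.insert (b, ia.2) (co1.getD (b, ia.2) 0 + k)) co) co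

lemma pv_tails_apply_A (plist : List Int) (co : PySem.Dict (Int × Int) Int) :
    pvTails (fun co a b =>
        if a = b then co
        else
          let co1 := co.modify (a, b) 0 (fun v => v + 1)
          co1.modify (b, a) 0 (fun v => v + 1)) plist co
      = pvApply (pvSA plist) co := by
  rw [pvTails_eq_pairs, pvApply, pvSA, List.foldl_flatMap]
  apply PySem.List.foldl_congr_mem
  intro co p _
  by_cases h : p.1 = p.2
  · simp [h]
  · simp only [h, if_false]
    rfl

lemma pv_innerA_eq (plist : List Int) (co : PySem.Dict (Int × Int) Int) :
    pvInnerA co plist = pvApply (pvSA plist) co := by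
  unfold pvInnerA
  by_cases hlen : ((plist.length : Int)) < 2
  · rw [if_pos hlen]
    match plist, hlen with
    | [], _ => rfl
    | [x], _ => rfl
    | x :: y :: t, h => simp at h; omega
  · rw [if_neg hlen]
    have h0 : ((0 : Nat) : Int) = (0 : Int) := rfl
    have := pv_range_double (fun co a b =>
        if a = b then co
        else
          let co1 := co.modify (a, b) 0 (fun v => v + 1)
          co1.modify (b, a) 0 (fun v => v + 1)) plist plist 0 rfl co
    rw [h0] at this
    rw [this, pv_tails_apply_A]

lemma pv_tails_apply_B (plist : List Int) (co : PySem.Dict (Int × Int) Int) :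
    pvTails (fun co a b =>
        let k : Int := (PySem.Dict.counter plist).getD a 0 * (PySem.Dict.counter plist).getD b 0
        let co1 := co.insert (a, b) (co.getD (a, b) 0 + k)
        co1.insert (b, a) (co1.getD (b, a) 0 + k)) (PySem.Set.ofList plist) co
      = pvApply (pvSB (pvCI plist) (PySem.Set.ofList plist)) co := by
  rw [pvTails_eq_pairs, pvApply, pvSB, List.foldl_flatMap]
  apply PySem.List.foldl_congr_mem
  intro co p _
  simp only [PySem.Dict.getD_counter]
  rfl

lemma pv_innerB_eq (plist : List Int) (co : PySem.Dict (Int × Int) Int) :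
    pvInnerB co plist = pvApply (pvSB (pvCI plist) (PySem.Set.ofList plist)) co := by
  unfold pvInnerB
  simp only [PySem.Dict.foldl_insert_getD_add_one_eq_counter, PySem.Dict.keys_counter]
  have h0 : ((0 : Nat) : Int) = (0 : Int) := rfl
  have := pv_enum_double (fun co a b =>
      let k : Int := (PySem.Dict.counter plist).getD a 0 * (PySem.Dict.counter plist).getD b 0
      let co1 := co.insert (a, b) (co.getD (a, b) 0 + k)
      co1.insert (b, a) (co1.getD (b, a) 0 + k))
    (PySem.Set.ofList plist) (PySem.Set.ofList plist) 0 rfl co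
  rw [h0] at this
  rw [this, pv_tails_apply_B]

lemma pv_outer (vs : List (List Int)) :
    ∀ (co : PySem.Dict (Int × Int) Int), co.keys.Nodup →
      vs.foldl pvInnerA co = vs.foldl pvInnerB co := by
  induction vs with
  | nil => intro co _; rfl
  | cons v vs ih =>
      intro co h
      simp only [List.foldl_cons]
      have hv : pvInnerA co v = pvInnerB co v := by
        rw [pv_innerA_eq, pv_innerB_eq, pv_inner_agree v co h]
      rw [hv]
      apply ih
      rw [pv_innerB_eq]
      exact pv_apply_nodup _ co h


-- ===== VERDICT (by name: the statement is the Claim_ definition above) =====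
theorem build_copurchase_counts_spec : Claim_equal_build_copurchase_counts := by
  intro order_items _
  unfold Spec_build_copurchase_counts build_copurchase_counts build_copurchase_counts_alt
  show ((order_items.foldl (fun d op => d.insert op.1 (d.getD op.1 [] ++ [op.2]))
      PySem.Dict.empty).values.foldl pvInnerA PySem.Dict.empty).items.map
        (fun p => (p.1.1, p.1.2, p.2))
    = ((order_items.foldl (fun d op => d.insert op.1 (d.getD op.1 [] ++ [op.2]))
      PySem.Dict.empty).values.foldl pvInnerB PySem.Dict.empty).items.map
        (fun p => (p.1.1, p.1.2, p.2))
  rw [pv_outer _ PySem.Dict.empty (by simp [PySem.Dict.empty, PySem.Dict.keys])]
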